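-- pv_equiv track=rewrite | github.com/niwatorinoko/My-Algo-Solutions | Easy/Untitled-1.py | generate_barcode
-- ===== SOURCE A (Python) =====
-- def generate_barcode(n):
--     barcode = ""
--     digits = str(n)
--
--     for i in range(0, len(digits), 3):
--         segment = digits[i:i+3]
--
--         for row in range(3):
--             for digit in segment:
--                 count = int(digit)
--
--                 if row < count:
--                     barcode += "#"
--                 else:
--                     barcode += "."
--
--             barcode += "\n"
--
--     return barcode.strip()
-- ===== SOURCE B (Python) =====
-- def generate_barcode(n):
--     digits = str(n)
--     rows = []
--     for i in range(0, len(digits), 3):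
--         segment = digits[i:i+3]
--         columns = []
--         for digit in segment:
--             count = int(digit)
--             k = min(count, 3)
--             columns.append("#" * k + "." * (3 - k))
--         for r in range(3):
--             rows.append("".join(col[r] for col in columns))
--     return "\n".join(rows)
-- ===== Notes on version B (the rewrite author's own statement) =====
-- stated objective: alternative
-- what changed: A emits characters row by row, appending '#'/'.' per digit directly into one growing string and stripping the trailing newline; B first builds a 3-character vertical column string per digit ('#'*min(count,3) padded with '.'), then transposes the columns of each 3-digit segment into row strings and joins all rows with newlines.
import Mathlib
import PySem

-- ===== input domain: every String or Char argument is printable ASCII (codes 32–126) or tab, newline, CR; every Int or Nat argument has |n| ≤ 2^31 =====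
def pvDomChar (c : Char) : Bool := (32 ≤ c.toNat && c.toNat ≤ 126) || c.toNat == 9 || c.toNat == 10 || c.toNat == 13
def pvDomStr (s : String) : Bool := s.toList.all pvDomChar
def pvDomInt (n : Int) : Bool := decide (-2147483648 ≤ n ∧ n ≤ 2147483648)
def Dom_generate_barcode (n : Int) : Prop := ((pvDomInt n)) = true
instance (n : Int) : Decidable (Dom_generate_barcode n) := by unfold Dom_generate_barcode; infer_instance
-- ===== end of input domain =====

-- B builds one 3-char column per digit and transposes each 3-digit segment into rows,
-- instead of A's direct row-by-row character emission; objective: alternative decomposition.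


-- ===== PORT A =====
def generate_barcode (n : Int) : String :=
  let digits : List Char := PySem.Int.toChars n
  let barcode : List Char :=
    (PySem.List.pyRange 0 (PySem.Chars.len digits) 3).foldl (fun barcode i =>
      let segment := PySem.List.slice digits (some i) (some (i + 3))
      (PySem.List.pyRange 0 3 1).foldl (fun barcode row =>
        (segment.foldl (fun barcode digit =>
          -- int(digit): ValueError (none) is excluded by Pre_generate_barcode (0 ≤ n)
          let count := (PySem.Int.ofChars? [digit]).getD 0
          if row < count then barcode ++ ['#'] else barcode ++ ['.']) barcode)
        ++ ['\n']) barcode) []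
  String.ofList (PySem.Chars.strip barcode)

-- ===== PORT B =====
def generate_barcode_alt (n : Int) : String :=
  let digits : List Char := PySem.Int.toChars n
  let rows : List (List Char) :=
    (PySem.List.pyRange 0 (PySem.Chars.len digits) 3).foldl (fun rows i =>
      let segment := PySem.List.slice digits (some i) (some (i + 3))
      let columns : List (List Char) := segment.foldl (fun cols digit =>
        -- int(digit): ValueError (none) is excluded by Pre_generate_barcode (0 ≤ n)
        let count := (PySem.Int.ofChars? [digit]).getD 0
        let k := min count 3
        cols ++ [List.replicate k.toNat '#' ++ List.replicate (3 - k).toNat '.']) []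
      (PySem.List.pyRange 0 3 1).foldl (fun rows r =>
        rows ++ [columns.foldl (fun acc col => acc ++ (PySem.List.pyGet? col r).toList) []]) rows) []
  String.ofList (PySem.Chars.join ['\n'] rows)

-- ===== PRECONDITION & SPEC =====
-- Pre_ excludes n < 0, where str(n) contains '-' and int('-') raises ValueError in A (and in B).
def Pre_generate_barcode (n : Int) : Prop := 0 ≤ n
instance (n : Int) : Decidable (Pre_generate_barcode n) := by unfold Pre_generate_barcode; infer_instance
def pvWitness_generate_barcode : Int := (1074)

def Spec_generate_barcode (n : Int) (out : String) : Prop := out = generate_barcode_alt n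
instance (n : Int) (out : String) : Decidable (Spec_generate_barcode n out) := by unfold Spec_generate_barcode; infer_instance

-- ===== CLAIM (what is proved, stated in full; the proofs are below) =====
def Claim_equal_generate_barcode : Prop := ∀ (n : Int), Dom_generate_barcode n → Pre_generate_barcode n → Spec_generate_barcode n (generate_barcode n)

-- ===== LEMMAS AND PROOFS =====

-- digit value as both ports compute it
def pvCnt (c : Char) : Int := (PySem.Int.ofChars? [c]).getD 0
-- the r-th row of a segment, as characters
def pvRow (seg : List Char) (r : Int) : List Char := seg.map (fun c => if r < pvCnt c then '#' else '.')
-- B's column for one digit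
def pvCol (c : Char) : List Char :=
  List.replicate (min (pvCnt c) 3).toNat '#' ++ List.replicate (3 - min (pvCnt c) 3).toNat '.'
-- what one segment contributes on A's side / on B's side
def pvHA (seg : List Char) : List Char :=
  pvRow seg 0 ++ ['\n'] ++ pvRow seg 1 ++ ['\n'] ++ pvRow seg 2 ++ ['\n']
def pvHB (seg : List Char) : List (List Char) := [pvRow seg 0, pvRow seg 1, pvRow seg 2]
-- the 3-character chunks of the digit string
def chunk3 : List Char → List (List Char)
  | [] => []
  | c :: t => (c :: t.take 2) :: chunk3 (t.drop 2)
termination_by ds => ds.length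
decreasing_by simp

lemma chunk3_cons (ds : List Char) (h : ds ≠ []) :
    chunk3 ds = ds.take 3 :: chunk3 (ds.drop 3) := by
  cases ds with
  | nil => exact absurd rfl h
  | cons c t => rw [chunk3]; simp

lemma pyRange_three_nil (a b : Int) (h : b ≤ a) : PySem.List.pyRange a b 3 = [] := by
  rw [PySem.List.pyRange_of_pos a b (by norm_num), if_neg (not_lt.mpr h)]
  simp

lemma pyRange_three_cons (a b : Int) (h : a < b) :
    PySem.List.pyRange a b 3 = a :: PySem.List.pyRange (a + 3) b 3 := by
  rw [PySem.List.pyRange_of_pos a b (by norm_num), PySem.List.pyRange_of_pos (a + 3) b (by norm_num),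
    if_pos h]
  by_cases h3 : a + 3 < b
  · rw [if_pos h3]
    have hm : ((b - a + 3 - 1) / 3).toNat = ((b - (a + 3) + 3 - 1) / 3).toNat + 1 := by omega
    rw [hm, List.range_succ_eq_map]
    simp only [List.map_cons, List.map_map]
    simp only [Nat.cast_zero, mul_zero, add_zero]
    congr 1
    exact List.map_congr_left (fun k _ => by simp only [Function.comp_apply]; push_cast; ring)
  · rw [if_neg h3]
    have hm : ((b - a + 3 - 1) / 3).toNat = 1 := by omega
    rw [hm]
    simp

-- the outer loop of both ports: a fold over range(0, len, 3) of slices is a fold over chunk3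
lemma fold_chunk_aux {β : Type} (f : β → List Char → β) (full : List Char) :
    ∀ (fuel k : Nat) (init : β), full.length ≤ k + fuel →
    (PySem.List.pyRange (k : Int) ((full.length : Nat) : Int) 3).foldl
        (fun acc i => f acc (PySem.List.slice full (some i) (some (i + 3)))) init
      = (chunk3 (full.drop k)).foldl f init := by
  intro fuel
  induction fuel with
  | zero =>
    intro k init hk
    rw [pyRange_three_nil _ _ (by exact_mod_cast hk)]
    rw [List.drop_eq_nil_of_le (by omega)]
    rw [chunk3]
    simp
  | succ m ih =>
    intro k init hk
    by_cases hlt : k < full.length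
    · rw [pyRange_three_cons _ _ (by exact_mod_cast hlt)]
      simp only [List.foldl_cons]
      have hslice : PySem.List.slice full (some (k : Int)) (some ((k : Int) + 3)) =
          (full.drop k).take 3 := by
        have h := PySem.List.slice_natCast_add (xs := full) (j := k) (n := 3)
        push_cast at h ⊢
        exact h
      rw [hslice]
      have hcast : (k : Int) + 3 = ((k + 3 : Nat) : Int) := by push_cast; ring
      rw [hcast, ih (k + 3) (f init ((full.drop k).take 3)) (by omega)]
      rw [chunk3_cons (full.drop k) (by simp only [ne_eq, List.drop_eq_nil_iff]; omega)]
      rw [List.drop_drop]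
      simp
    · rw [pyRange_three_nil _ _ (by exact_mod_cast Nat.le_of_not_lt hlt)]
      rw [List.drop_eq_nil_of_le (by omega)]
      rw [chunk3]
      simp

lemma fold_chunk {β : Type} (f : β → List Char → β) (full : List Char) (init : β) :
    (PySem.List.pyRange 0 ((full.length : Nat) : Int) 3).foldl
        (fun acc i => f acc (PySem.List.slice full (some i) (some (i + 3)))) init
      = (chunk3 full).foldl f init := by
  have h := fold_chunk_aux f full full.length 0 init (by omega)
  simpa using h

-- B's column, read at row r ∈ {0,1,2}, is exactly A's character for that digit and row
lemma colGet (c : Char) (r : Nat) (hr : r < 3) :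
    (PySem.List.pyGet? (pvCol c) ((r : Nat) : Int)).toList
      = [if ((r : Nat) : Int) < pvCnt c then '#' else '.'] := by
  unfold pvCol
  rw [PySem.List.pyGet?_natCast]
  set m := pvCnt c with hm
  by_cases hlt : r < (min m 3).toNat
  · rw [List.getElem?_append_left (by simpa using hlt)]
    simp only [List.getElem?_replicate, if_pos hlt, Option.toList_some]
    rw [if_pos (by omega)]
  · rw [List.getElem?_append_right (by simpa using Nat.le_of_not_lt hlt)]
    simp only [List.length_replicate, List.getElem?_replicate]
    rw [if_pos (by omega)]
    simp only [Option.toList_some]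
    rw [if_neg (by omega)]

-- one segment, A's inner two loops: append the three rows, each followed by '\n'
lemma segA (bar seg : List Char) :
    (PySem.List.pyRange 0 3 1).foldl (fun bar row =>
        (seg.foldl (fun bar digit =>
          let count := (PySem.Int.ofChars? [digit]).getD 0
          if row < count then bar ++ ['#'] else bar ++ ['.']) bar) ++ ['\n']) bar
      = bar ++ pvHA seg := by
  have hrow : ∀ (r : Int) (b : List Char),
      seg.foldl (fun bar digit =>
        let count := (PySem.Int.ofChars? [digit]).getD 0
        if r < count then bar ++ ['#'] else bar ++ ['.']) b = b ++ pvRow seg r := by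
    intro r b
    have h := PySem.List.foldl_congr_mem seg
      (fun bar digit =>
        let count := (PySem.Int.ofChars? [digit]).getD 0
        if r < count then bar ++ ['#'] else bar ++ ['.'])
      (fun bar digit => bar ++ [if r < pvCnt digit then '#' else '.'])
      b (by intro acc x _; simp only [pvCnt]; split_ifs <;> rfl)
    rw [h, PySem.List.foldl_append_singleton_eq_map]
    rfl
  have h3 : PySem.List.pyRange 0 3 1 = [0, 1, 2] := by decide
  rw [h3]
  simp only [List.foldl_cons, List.foldl_nil, hrow]
  simp [pvHA, List.append_assoc]

-- one segment, B's inner two loops: append the three transposed rows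
lemma segB (rows : List (List Char)) (seg : List Char) :
    (PySem.List.pyRange 0 3 1).foldl (fun rows r =>
        rows ++ [(seg.foldl (fun cols digit =>
            let count := (PySem.Int.ofChars? [digit]).getD 0
            let k := min count 3
            cols ++ [List.replicate k.toNat '#' ++ List.replicate (3 - k).toNat '.']) []).foldl
          (fun acc col => acc ++ (PySem.List.pyGet? col r).toList) []]) rows
      = rows ++ pvHB seg := by
  have hcols : seg.foldl (fun cols digit =>
      let count := (PySem.Int.ofChars? [digit]).getD 0
      let k := min count 3
      cols ++ [List.replicate k.toNat '#' ++ List.replicate (3 - k).toNat '.']) []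
      = seg.map pvCol := by
    have h := PySem.List.foldl_append_singleton_eq_map (l := seg) (f := pvCol)
      (acc := ([] : List (List Char)))
    simpa [pvCol, pvCnt] using h
  have hjoin : ∀ (r : Nat), r < 3 →
      (seg.map pvCol).foldl (fun acc col => acc ++ (PySem.List.pyGet? col ((r : Nat) : Int)).toList) []
        = pvRow seg ((r : Nat) : Int) := by
    intro r hr
    rw [PySem.List.foldl_append_eq_flatMap, List.flatMap_map]
    simp only [List.nil_append]
    have hpt : (fun c => (PySem.List.pyGet? (pvCol c) ((r : Nat) : Int)).toList)
        = (fun c => [if ((r : Nat) : Int) < pvCnt c then '#' else '.']) :=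
      funext fun c => colGet c r hr
    calc seg.flatMap (fun c => (PySem.List.pyGet? (pvCol c) ((r : Nat) : Int)).toList)
        = seg.flatMap (fun c => [if ((r : Nat) : Int) < pvCnt c then '#' else '.']) := by rw [hpt]
      _ = pvRow seg ((r : Nat) : Int) := by
          unfold pvRow
          induction seg with
          | nil => rfl
          | cons x t iht => simp_all
  have h3 : PySem.List.pyRange 0 3 1 = [0, 1, 2] := by decide
  rw [h3, hcols]
  simp only [List.foldl_cons, List.foldl_nil]
  have e0 := hjoin 0 (by norm_num)
  have e1 := hjoin 1 (by norm_num)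
  have e2 := hjoin 2 (by norm_num)
  simp only [Nat.cast_ofNat, Nat.cast_zero, Nat.cast_one] at e0 e1 e2
  rw [e0, e1, e2]
  simp [pvHB, List.append_assoc]

-- every segment produced by chunk3 is nonempty
lemma chunk3_ne_nil : ∀ (ds : List Char), ∀ seg ∈ chunk3 ds, seg ≠ [] := by
  intro ds
  generalize hL : ds.length = L
  induction L using Nat.strong_induction_on generalizing ds with
  | _ L ih =>
    cases ds with
    | nil => rw [chunk3]; simp
    | cons c t =>
      intro seg hseg
      rw [chunk3] at hseg
      rcases List.mem_cons.mp hseg with h | h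
      · simp [h]
      · exact ih (t.drop 2).length (by simp at hL ⊢; omega) (t.drop 2) rfl seg h

-- join with '\n' of a nonempty row list starts with its first row
lemma join_eq_append (r : List Char) (rs : List (List Char)) :
    ∃ s, PySem.Chars.join ['\n'] (r :: rs) = r ++ s := by
  cases rs with
  | nil => exact ⟨[], by rw [PySem.Chars.join_singleton]; simp⟩
  | cons r2 t => exact ⟨['\n'] ++ PySem.Chars.join ['\n'] (r2 :: t),
      by rw [PySem.Chars.join_cons_cons]; simp⟩

-- rendering: concatenating rows each followed by '\n' is join-with-'\n' plus a trailing '\n'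
lemma render_eq (r : List Char) (rs : List (List Char)) :
    (r :: rs).flatMap (· ++ ['\n']) = PySem.Chars.join ['\n'] (r :: rs) ++ ['\n'] := by
  induction rs generalizing r with
  | nil => rw [PySem.Chars.join_singleton]; simp
  | cons r2 t ih =>
    rw [PySem.Chars.join_cons_cons]
    have h : (r :: r2 :: t).flatMap (· ++ ['\n'])
        = (r ++ ['\n']) ++ (r2 :: t).flatMap (· ++ ['\n']) := by simp
    rw [h, ih r2]
    simp

-- the join of nonempty whitespace-free rows has no trailing whitespace
lemma rstrip_join (rows : List (List Char))
    (h : ∀ row ∈ rows, row ≠ [] ∧ ∀ c ∈ row, PySem.Chars.isspace c = false) :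
    List.dropWhile PySem.Chars.isspace (PySem.Chars.join ['\n'] rows).reverse
      = (PySem.Chars.join ['\n'] rows).reverse := by
  induction rows with
  | nil => simp [PySem.Chars.join_nil]
  | cons r rs ih =>
    cases rs with
    | nil =>
      rw [PySem.Chars.join_singleton, List.dropWhile_eq_self_iff]
      intro hne
      have hmem : r.reverse[0] ∈ r := List.mem_reverse.mp (List.getElem_mem hne)
      rw [(h r (by simp)).2 _ hmem]
      simp
    | cons r2 t =>
      rw [PySem.Chars.join_cons_cons]
      have hJ := ih (fun row hrow => h row (by simp [hrow]))
      have hJne : PySem.Chars.join ['\n'] (r2 :: t) ≠ [] := by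
        obtain ⟨s, hs⟩ := join_eq_append r2 t
        have hr2 := (h r2 (by simp)).1
        rw [hs]
        simp [hr2]
      rw [show r ++ ['\n'] ++ PySem.Chars.join ['\n'] (r2 :: t)
            = (r ++ ['\n']) ++ PySem.Chars.join ['\n'] (r2 :: t) by simp,
          List.reverse_append, List.dropWhile_append, hJ]
      rw [if_neg (by simp [hJne])]

-- strip of the rendered rows is the '\n'-join of the rows
lemma strip_render (rows : List (List Char))
    (h : ∀ row ∈ rows, row ≠ [] ∧ ∀ c ∈ row, PySem.Chars.isspace c = false) :
    PySem.Chars.strip (rows.flatMap (· ++ ['\n'])) = PySem.Chars.join ['\n'] rows := by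
  cases rows with
  | nil => decide
  | cons r rs =>
    rw [render_eq]
    obtain ⟨s, hs⟩ := join_eq_append r rs
    obtain ⟨c, r', hr⟩ := List.exists_cons_of_ne_nil (h r (by simp)).1
    have hc : PySem.Chars.isspace c = false := (h r (by simp)).2 c (by simp [hr])
    unfold PySem.Chars.strip PySem.Chars.lstrip PySem.Chars.rstrip
    have hl : List.dropWhile PySem.Chars.isspace (PySem.Chars.join ['\n'] (r :: rs) ++ ['\n'])
        = PySem.Chars.join ['\n'] (r :: rs) ++ ['\n'] := by
      rw [hs, hr]
      simp [hc]
    rw [hl, List.reverse_append]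
    have hnl : List.dropWhile PySem.Chars.isspace
        (['\n'].reverse ++ (PySem.Chars.join ['\n'] (r :: rs)).reverse)
        = (PySem.Chars.join ['\n'] (r :: rs)).reverse := by
      simp only [List.reverse_singleton, List.singleton_append, List.dropWhile_cons]
      rw [if_pos (by decide)]
      exact rstrip_join (r :: rs) h
    rw [hnl, List.reverse_reverse]

-- every row produced from a chunk3 segment is nonempty and whitespace-free
lemma rows_good (ds : List Char) :
    ∀ row ∈ (chunk3 ds).flatMap pvHB, row ≠ [] ∧ ∀ c ∈ row, PySem.Chars.isspace c = false := by
  intro row hrow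
  obtain ⟨seg, hseg, hmem⟩ := List.mem_flatMap.mp hrow
  have hne := chunk3_ne_nil ds seg hseg
  have hform : ∃ r : Int, row = pvRow seg r := by
    simp only [pvHB, List.mem_cons, List.not_mem_nil, or_false] at hmem
    rcases hmem with h | h | h
    exacts [⟨0, h⟩, ⟨1, h⟩, ⟨2, h⟩]
  obtain ⟨r, hform⟩ := hform
  subst hform
  constructor
  · simp [pvRow, hne]
  · intro c hc
    obtain ⟨x, _, hx⟩ := List.mem_map.mp hc
    split_ifs at hx <;> simp [← hx] <;> decide

-- ===== VERDICT (by name: the statement is the Claim_ definition above) =====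
theorem generate_barcode_spec : Claim_equal_generate_barcode := by
  intro n _ _
  unfold Spec_generate_barcode generate_barcode generate_barcode_alt
  simp only [PySem.Chars.len_eq]
  refine congrArg String.ofList ?_
  have hA : (PySem.List.pyRange 0 (((PySem.Int.toChars n).length : Nat) : Int) 3).foldl
      (fun barcode i =>
        (PySem.List.pyRange 0 3 1).foldl (fun barcode row =>
          ((PySem.List.slice (PySem.Int.toChars n) (some i) (some (i + 3))).foldl
            (fun barcode digit =>
              let count := (PySem.Int.ofChars? [digit]).getD 0
              if row < count then barcode ++ ['#'] else barcode ++ ['.']) barcode)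
          ++ ['\n']) barcode) []
      = (chunk3 (PySem.Int.toChars n)).flatMap pvHA := by
    refine Eq.trans (fold_chunk (f := fun bar seg =>
      (PySem.List.pyRange 0 3 1).foldl (fun bar row =>
        (seg.foldl (fun bar digit =>
          let count := (PySem.Int.ofChars? [digit]).getD 0
          if row < count then bar ++ ['#'] else bar ++ ['.']) bar) ++ ['\n']) bar)
      (PySem.Int.toChars n) []) ?_
    refine Eq.trans (PySem.List.foldl_congr_mem _ _ (fun bar seg => bar ++ pvHA seg) _
      (by intro acc x _; exact segA acc x)) ?_
    refine Eq.trans (PySem.List.foldl_append_eq_flatMap pvHA _ _) ?_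
    simp
  have hB : (PySem.List.pyRange 0 (((PySem.Int.toChars n).length : Nat) : Int) 3).foldl
      (fun rows i =>
        (PySem.List.pyRange 0 3 1).foldl (fun rows r =>
          rows ++ [((PySem.List.slice (PySem.Int.toChars n) (some i) (some (i + 3))).foldl
              (fun cols digit =>
                let count := (PySem.Int.ofChars? [digit]).getD 0
                let k := min count 3
                cols ++ [List.replicate k.toNat '#' ++ List.replicate (3 - k).toNat '.']) []).foldl
            (fun acc col => acc ++ (PySem.List.pyGet? col r).toList) []]) rows) []
      = (chunk3 (PySem.Int.toChars n)).flatMap pvHB := by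
    refine Eq.trans (fold_chunk (f := fun rows seg =>
      (PySem.List.pyRange 0 3 1).foldl (fun rows r =>
        rows ++ [(seg.foldl (fun cols digit =>
            let count := (PySem.Int.ofChars? [digit]).getD 0
            let k := min count 3
            cols ++ [List.replicate k.toNat '#' ++ List.replicate (3 - k).toNat '.']) []).foldl
          (fun acc col => acc ++ (PySem.List.pyGet? col r).toList) []]) rows)
      (PySem.Int.toChars n) []) ?_
    refine Eq.trans (PySem.List.foldl_congr_mem _ _ (fun rows seg => rows ++ pvHB seg) _
      (by intro acc x _; exact segB acc x)) ?_
    refine Eq.trans (PySem.List.foldl_append_eq_flatMap pvHB _ _) ?_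
    simp
  rw [hA, hB]
  have hfun : ∀ seg, pvHA seg = (pvHB seg).flatMap (· ++ ['\n']) := by
    intro seg
    simp [pvHA, pvHB, List.append_assoc]
  have hflat : (chunk3 (PySem.Int.toChars n)).flatMap pvHA
      = ((chunk3 (PySem.Int.toChars n)).flatMap pvHB).flatMap (· ++ ['\n']) := by
    rw [List.flatMap_assoc]
    exact congrArg (fun g => List.flatMap g (chunk3 (PySem.Int.toChars n))) (funext hfun)
  rw [hflat]
  exact strip_render _ (rows_good (PySem.Int.toChars n))
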